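-- pv_equiv track=rewrite | github.com/kishkash555/biu | NLP-courses/89680-NLP/assignment1/code/GreedyMaxEntTag.py | get_registered_features
-- ===== SOURCE A (Python) =====
-- def get_registered_features(feature_names):
--     registered_words = []
--     registered_tags = []
--     registered_tag_pairs = []
--     is_word = "is_word_"
--     iwl = len(is_word)
--     prev_tag= "prev_tag_"
--     ptl = len(prev_tag)
--     prev_2 = "last_2_tags_"
--     p2l = len(prev_2)
--     for name in feature_names:
--         if name.startswith(is_word):
--             registered_words.append(name[iwl:])
--         elif name.startswith(prev_tag):
--             registered_tags.append(name[ptl:])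
--         elif name.startswith(prev_2):
--             tag1,tag2 = name[p2l:].split("_")
--             registered_tag_pairs.append((tag1,tag2))
--     return registered_words, registered_tags, registered_tag_pairs
-- ===== SOURCE B (Python) =====
-- # B: three independent filtered passes (one per output list) instead of A's single
-- # if/elif classification loop; the two-element unpack for tag pairs is kept.
-- def _pair(suffix):
--     tag1, tag2 = suffix.split("_")
--     return (tag1, tag2)
--
-- def get_registered_features(feature_names):
--     words = [n[len("is_word_"):] for n in feature_names if n.startswith("is_word_")]
--     tags = [n[len("prev_tag_"):] for n in feature_names if n.startswith("prev_tag_")]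
--     pairs = [_pair(n[len("last_2_tags_"):]) for n in feature_names if n.startswith("last_2_tags_")]
--     return words, tags, pairs
-- ===== Notes on version B (the rewrite author's own statement) =====
-- stated objective: simpler
-- what changed: Replaces the single if/elif loop mutating three accumulators with three independent filtered passes over feature_names, one comprehension per output list (prefix exclusivity makes them equivalent).
import Mathlib
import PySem

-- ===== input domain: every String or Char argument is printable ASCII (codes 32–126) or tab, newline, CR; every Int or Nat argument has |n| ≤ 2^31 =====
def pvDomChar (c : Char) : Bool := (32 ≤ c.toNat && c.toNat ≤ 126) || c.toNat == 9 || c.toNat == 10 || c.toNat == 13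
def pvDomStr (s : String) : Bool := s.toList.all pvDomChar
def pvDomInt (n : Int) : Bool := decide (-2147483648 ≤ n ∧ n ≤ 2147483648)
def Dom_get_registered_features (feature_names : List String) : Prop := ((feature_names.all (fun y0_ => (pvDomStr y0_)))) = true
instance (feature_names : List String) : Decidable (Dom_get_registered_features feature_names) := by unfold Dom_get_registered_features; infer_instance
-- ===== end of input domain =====

-- B replaces A's single if/elif loop with three independent filtered passes, one per
-- output list (objective: simpler). Return-value equivalence on Pre_ (A raises outside it).

-- ===== PORT A =====
-- one loop step of A: the if/elif chain appending to one of three accumulators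
def grfStepA (st : List String × List String × List (String × String)) (name : String) :
    List String × List String × List (String × String) :=
  if PySem.Str.startswith name "is_word_" then
    (st.1 ++ [PySem.Str.slice name (some 8) none], st.2.1, st.2.2)
  else if PySem.Str.startswith name "prev_tag_" then
    (st.1, st.2.1 ++ [PySem.Str.slice name (some 9) none], st.2.2)
  else if PySem.Str.startswith name "last_2_tags_" then
    match PySem.Str.split? (PySem.Str.slice name (some 12) none) "_" with
    | some [tag1, tag2] => (st.1, st.2.1, st.2.2 ++ [(tag1, tag2)])
    | _ => st   -- Python raises ValueError here (unpack of ≠ 2 parts); excluded by Pre_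
  else st

def get_registered_features (feature_names : List String) : List String × List String × (List (String × String)) :=
  feature_names.foldl grfStepA ([], [], [])

-- ===== PORT B =====
-- B-side helpers: one Option-valued classifier per output list
def grfWord (n : String) : Option String :=
  if PySem.Str.startswith n "is_word_" then some (PySem.Str.slice n (some 8) none) else none

def grfTag (n : String) : Option String :=
  if PySem.Str.startswith n "prev_tag_" then some (PySem.Str.slice n (some 9) none) else none

def grfPair (n : String) : Option (String × String) :=
  if PySem.Str.startswith n "last_2_tags_" then
    match PySem.Str.split? (PySem.Str.slice n (some 12) none) "_" with
    | some [tag1, tag2] => some (tag1, tag2)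
    | _ => none   -- Python raises ValueError here; excluded by Pre_
  else none

def get_registered_features_alt (feature_names : List String) : List String × List String × (List (String × String)) :=
  (feature_names.filterMap grfWord, feature_names.filterMap grfTag, feature_names.filterMap grfPair)

-- ===== PRECONDITION & SPEC =====
-- Pre_ excludes exactly the inputs on which A raises ValueError: a name starting with
-- "last_2_tags_" whose suffix does not split on "_" into exactly two parts.
def Pre_get_registered_features (feature_names : List String) : Prop :=
  ∀ n ∈ feature_names, PySem.Str.startswith n "last_2_tags_" = true →
    PySem.Str.count (PySem.Str.slice n (some 12) none) "_" = 1

instance (feature_names : List String) : Decidable (Pre_get_registered_features feature_names) := by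
  unfold Pre_get_registered_features; infer_instance

def pvWitness_get_registered_features : List String :=
  ["is_word_dog", "prev_tag_NN", "last_2_tags_NN_VB", "other"]

def Spec_get_registered_features (feature_names : List String) (out : List String × List String × (List (String × String))) : Prop := out = get_registered_features_alt feature_names
instance (feature_names : List String) (out : List String × List String × (List (String × String))) : Decidable (Spec_get_registered_features feature_names out) := by unfold Spec_get_registered_features; infer_instance

-- ===== CLAIM (what is proved, stated in full; the proofs are below) =====
def Claim_equal_get_registered_features : Prop := ∀ (feature_names : List String), Dom_get_registered_features feature_names → Pre_get_registered_features feature_names → Spec_get_registered_features feature_names (get_registered_features feature_names)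

-- ===== LEMMAS AND PROOFS =====

-- two distinct nonempty prefixes with different first characters cannot both prefix s
lemma grf_prefix_excl {s p q : String} (hph : p.toList.head? ≠ q.toList.head?)
    (hpn : p.toList ≠ []) (hqn : q.toList ≠ []) (hp : PySem.Str.startswith s p = true) :
    PySem.Str.startswith s q = false := by
  by_contra h
  rw [Bool.not_eq_false, PySem.Str.startswith_eq, PySem.Chars.startswith_iff] at h
  rw [PySem.Str.startswith_eq, PySem.Chars.startswith_iff] at hp
  obtain ⟨t1, h1⟩ := hp
  obtain ⟨t2, h2⟩ := h
  apply hph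
  have e1 : s.toList.head? = p.toList.head? := by
    rw [← h1]; cases hc : p.toList with
    | nil => exact absurd hc hpn
    | cons a l => simp
  have e2 : s.toList.head? = q.toList.head? := by
    rw [← h2]; cases hc : q.toList with
    | nil => exact absurd hc hqn
    | cons a l => simp
  rw [← e1, e2]

lemma grf_loop (names : List String) (st : List String × List String × List (String × String)) :
    names.foldl grfStepA st =
      (st.1 ++ names.filterMap grfWord, st.2.1 ++ names.filterMap grfTag,
        st.2.2 ++ names.filterMap grfPair) := by
  induction names generalizing st with
  | nil => simp
  | cons n ns ih =>
    simp only [List.foldl_cons, List.filterMap_cons, ih]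
    by_cases hw : PySem.Str.startswith n "is_word_" = true
    · have ht : PySem.Str.startswith n "prev_tag_" = false :=
        grf_prefix_excl (by decide) (by decide) (by decide) hw
      have hp : PySem.Str.startswith n "last_2_tags_" = false :=
        grf_prefix_excl (by decide) (by decide) (by decide) hw
      simp at hw ht hp
      simp [grfStepA, grfWord, grfTag, grfPair, hw, ht, hp]
    · by_cases ht : PySem.Str.startswith n "prev_tag_" = true
      · have hp : PySem.Str.startswith n "last_2_tags_" = false :=
          grf_prefix_excl (by decide) (by decide) (by decide) ht
        simp at hw ht hp
        simp [grfStepA, grfWord, grfTag, grfPair, hw, ht, hp]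
      · by_cases hp : PySem.Str.startswith n "last_2_tags_" = true
        · simp at hw ht hp
          cases hm : PySem.Str.split? (PySem.Str.slice n (some 12) none) "_" with
          | none => simp [grfStepA, grfWord, grfTag, grfPair, hw, ht, hp, hm]
          | some l =>
            match l with
            | [] => simp [grfStepA, grfWord, grfTag, grfPair, hw, ht, hp, hm]
            | [t1] => simp [grfStepA, grfWord, grfTag, grfPair, hw, ht, hp, hm]
            | [t1, t2] => simp [grfStepA, grfWord, grfTag, grfPair, hw, ht, hp, hm]
            | t1 :: t2 :: t3 :: rest => simp [grfStepA, grfWord, grfTag, grfPair, hw, ht, hp, hm]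
        · simp at hw ht hp
          simp [grfStepA, grfWord, grfTag, grfPair, hw, ht, hp]

-- ===== VERDICT (by name: the statement is the Claim_ definition above) =====
theorem get_registered_features_spec : Claim_equal_get_registered_features := by
  intro names _ _
  unfold Spec_get_registered_features get_registered_features get_registered_features_alt
  simpa using grf_loop names ([], [], [])
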